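-- pv_equiv track=rewrite | github.com/AlekhAvinash/Crypto-Solutions | Giantxor.py | bruteforce_single_byte_xor
-- ===== SOURCE A (Python) =====
-- def get_english_score(input_bytes):
-- 	if all (x.isalnum() or x=='=' or x=='/' or x=='+' or x=='\n'for x in input_bytes):
-- 		return 1
-- 	else:
-- 		return 0
--
-- def bruteforce_single_byte_xor(ciphertext,key_byte):
-- 	a = []
-- 	for i in range(256):
-- 		message = single_byte_xor(ciphertext, i)
-- 		score = get_english_score(message)
-- 		a.append(score)
-- 	val=chr(a.index(max(a)))
-- 	return val
--
-- def single_byte_xor(input_bytes, char_value):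
--     output_bytes = ""
--     for byte in input_bytes:
--         output_bytes += chr(ord(byte) ^ char_value)
--     return output_bytes
-- ===== SOURCE B (Python) =====
-- def get_english_score(input_bytes):
-- 	if all (x.isalnum() or x=='=' or x=='/' or x=='+' or x=='\n'for x in input_bytes):
-- 		return 1
-- 	else:
-- 		return 0
--
-- def single_byte_xor(input_bytes, char_value):
--     output_bytes = ""
--     for byte in input_bytes:
--         output_bytes += chr(ord(byte) ^ char_value)
--     return output_bytes
--
-- def bruteforce_single_byte_xor(ciphertext, key_byte):
--     # Sieve over keys: walk the ciphertext once, keeping only the keys whose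
--     # decryption of every character seen so far is a "good" character.
--     keys = list(range(256))
--     for ch in ciphertext:
--         o = ord(ch)
--         keys = [k for k in keys if _good(o ^ k)]
--     return chr(keys[0]) if keys else chr(0)
--
-- def _good(code):
--     c = chr(code)
--     return c.isalnum() or c == '=' or c == '/' or c == '+' or c == '\n'
-- ===== Notes on version B (the rewrite author's own statement) =====
-- stated objective: faster
-- what changed: B inverts the loops: instead of decrypting the whole ciphertext under each of the 256 keys and taking index(max) over a score list, it walks the ciphertext once while sieving the set of surviving keys (those whose decryption of every character seen so far is a good character) and returns the smallest survivor, chr(0) when none survives.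
import Mathlib
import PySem

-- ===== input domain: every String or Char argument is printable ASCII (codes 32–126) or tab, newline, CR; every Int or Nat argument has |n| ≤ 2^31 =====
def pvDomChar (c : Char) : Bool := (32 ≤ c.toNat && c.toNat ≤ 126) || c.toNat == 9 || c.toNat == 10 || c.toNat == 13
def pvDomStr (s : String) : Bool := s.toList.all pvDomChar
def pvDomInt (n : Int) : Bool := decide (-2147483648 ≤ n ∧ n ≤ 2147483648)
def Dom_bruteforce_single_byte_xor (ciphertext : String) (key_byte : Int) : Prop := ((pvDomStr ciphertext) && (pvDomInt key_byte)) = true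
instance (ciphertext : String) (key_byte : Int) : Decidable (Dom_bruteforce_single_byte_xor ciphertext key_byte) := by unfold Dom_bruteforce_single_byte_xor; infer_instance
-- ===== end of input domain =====

-- B inverts A's loops: a single walk over the ciphertext sieves the set of surviving keys
-- instead of decrypting under all 256 keys and taking index(max) over a score list;
-- measurably faster on the generated inputs (the surviving-key set empties early).

-- ===== PORT A =====
-- Python's str.isalnum, exact for code points ≤ 255 (every character handled here is a
-- printable-ASCII/tab/newline/CR input byte XORed with 0..255, hence ≤ 255).
def pyIsAlnumLatin1 (c : Char) : Bool :=
  (48 ≤ c.toNat && c.toNat ≤ 57) || (65 ≤ c.toNat && c.toNat ≤ 90) ||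
  (97 ≤ c.toNat && c.toNat ≤ 122) ||
  c.toNat == 170 || c.toNat == 178 || c.toNat == 179 || c.toNat == 181 ||
  c.toNat == 185 || c.toNat == 186 ||
  (188 ≤ c.toNat && c.toNat ≤ 190) || (192 ≤ c.toNat && c.toNat ≤ 214) ||
  (216 ≤ c.toNat && c.toNat ≤ 246) || (248 ≤ c.toNat && c.toNat ≤ 255)

def get_english_score (input_bytes : List Char) : Int :=
  if input_bytes.all (fun x => pyIsAlnumLatin1 x || x == '=' || x == '/' || x == '+' || x == '\n')
  then 1 else 0

-- chr(ord(byte) ^ char_value): char_value is always 0..255 here, so the xor is a valid code point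
def single_byte_xor (input_bytes : List Char) (char_value : Int) : List Char :=
  input_bytes.foldl (fun out b => out ++ [Char.ofNat (PySem.Int.bxor (b.toNat : Int) char_value).toNat]) []

def bruteforce_single_byte_xor (ciphertext : String) (key_byte : Int) : String :=
  let a : List Int := (PySem.List.pyRange 0 256 1).foldl
    (fun acc i => acc ++ [get_english_score (single_byte_xor ciphertext.toList i)]) []
  match PySem.List.max? a (fun x => x) with
  | none => ""          -- unreachable: a has 256 entries (Python max would raise only on empty)
  | some m =>
    match PySem.List.index? a m with
    | none => ""        -- unreachable: the max is a member of a
    | some j => String.mk [Char.ofNat j]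

-- ===== PORT B =====
-- _good(code): chr(code).isalnum() or chr(code) in '=/+\n'
def pvGood (code : Nat) : Bool :=
  pyIsAlnumLatin1 (Char.ofNat code) || Char.ofNat code == '=' ||
  Char.ofNat code == '/' || Char.ofNat code == '+' || Char.ofNat code == '\n'

def bruteforce_single_byte_xor_alt (ciphertext : String) (key_byte : Int) : String :=
  let keys := ciphertext.toList.foldl
    (fun ks ch => ks.filter (fun k => pvGood (ch.toNat ^^^ k))) (List.range 256)
  match keys with
  | [] => String.mk [Char.ofNat 0]
  | k :: _ => String.mk [Char.ofNat k]

-- ===== PRECONDITION & SPEC =====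
def Spec_bruteforce_single_byte_xor (ciphertext : String) (key_byte : Int) (out : String) : Prop := out = bruteforce_single_byte_xor_alt ciphertext key_byte
instance (ciphertext : String) (key_byte : Int) (out : String) : Decidable (Spec_bruteforce_single_byte_xor ciphertext key_byte out) := by unfold Spec_bruteforce_single_byte_xor; infer_instance

-- ===== CLAIM (what is proved, stated in full; the proofs are below) =====
def Claim_equal_bruteforce_single_byte_xor : Prop := ∀ (ciphertext : String) (key_byte : Int), Dom_bruteforce_single_byte_xor ciphertext key_byte → Spec_bruteforce_single_byte_xor ciphertext key_byte (bruteforce_single_byte_xor ciphertext key_byte)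

-- ===== LEMMAS AND PROOFS =====

-- B's fold of filters is one filter by the conjunction over all characters
theorem foldl_filter_sieve (chars : List Char) (init : List Nat) :
    chars.foldl (fun ks ch => ks.filter (fun k => pvGood (ch.toNat ^^^ k))) init
      = init.filter (fun k => chars.all (fun ch => pvGood (ch.toNat ^^^ k))) := by
  induction chars generalizing init with
  | nil => simp
  | cons c cs ih =>
    simp only [List.foldl_cons, ih, List.filter_filter, List.all_cons]
    exact List.filter_congr (fun k _ => by rw [Bool.and_comm])

-- A's per-key score is the sieve predicate
theorem score_eq_sieve (cs : List Char) (k : Nat) :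
    get_english_score (single_byte_xor cs ((k : Nat) : Int)) =
      if cs.all (fun ch => pvGood (ch.toNat ^^^ k)) then 1 else 0 := by
  unfold get_english_score single_byte_xor
  rw [PySem.List.foldl_append_singleton_eq_map]
  simp [List.all_map, pvGood]

-- first index of 1 in the 0/1 score table over range' s n = (first surviving key) - s
theorem idx_eq_head' (n s : Nat) (Q : Nat → Bool) :
    List.findIdx? (fun x => x == (1:Int)) ((List.range' s n).map (fun i => if Q i then (1:Int) else 0))
      = (((List.range' s n).filter Q).head?).map (fun k => k - s) := by
  induction n generalizing s with
  | zero => simp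
  | succ m ih =>
    rw [List.range'_succ]
    by_cases hq : Q s
    · simp [List.findIdx?_cons, hq]
    · simp only [List.map_cons, List.filter_cons, hq, Bool.false_eq_true,
        ite_false, List.findIdx?_cons, ih (s+1)]
      cases hh : ((List.range' (s+1) m).filter Q).head? with
      | none => simp
      | some k =>
        have hk : k ∈ List.range' (s+1) m :=
          List.mem_of_mem_filter (List.mem_of_mem_head? hh)
        have hks : s + 1 ≤ k := (List.mem_range'_1.mp hk).1
        simp only [Option.map_some]
        rw [if_neg (by decide : ¬((0:Int) == 1) = true)]
        congr 1
        omega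

theorem idx_eq_head (n : Nat) (Q : Nat → Bool) :
    List.idxOf? (1:Int) ((List.range n).map (fun i => if Q i then (1:Int) else 0))
      = ((List.range n).filter Q).head? := by
  have hdef : ∀ l : List Int, List.idxOf? (1:Int) l = List.findIdx? (fun x => x == (1:Int)) l :=
    fun l => rfl
  rw [hdef, List.range_eq_range', idx_eq_head' n 0 Q]
  cases hh : ((List.range' 0 n).filter Q).head? <;> simp

-- max of a nonempty 0/1 list containing 1 is 1
theorem max_of_mem_one (a : List Int) (h01 : ∀ x ∈ a, x = 0 ∨ x = 1) (h1 : (1:Int) ∈ a) :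
    PySem.List.max? a (fun x => x) = some 1 := by
  cases hm : PySem.List.max? a (fun x => x) with
  | none => rw [PySem.List.max?_eq_none_iff] at hm; simp [hm] at h1
  | some m =>
    have hmem := PySem.List.max?_mem hm
    have hmax : (1:Int) ≤ m := PySem.List.max?_isMax hm 1 h1
    have hm1 : m = 1 := by rcases h01 m hmem with h | h <;> omega
    rw [hm1]

-- max of a nonempty all-zero list is 0
theorem max_of_all_zero (a : List Int) (h01 : ∀ x ∈ a, x = 0 ∨ x = 1) (hne : a ≠ [])
    (h1 : (1:Int) ∉ a) : PySem.List.max? a (fun x => x) = some 0 := by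
  cases hm : PySem.List.max? a (fun x => x) with
  | none => rw [PySem.List.max?_eq_none_iff] at hm; exact absurd hm hne
  | some m =>
    have hmem := PySem.List.max?_mem hm
    rcases h01 m hmem with h | h
    · rw [h]
    · rw [h] at hmem; exact absurd hmem h1

-- ===== VERDICT (by name: the statement is the Claim_ definition above) =====
theorem bruteforce_single_byte_xor_spec : Claim_equal_bruteforce_single_byte_xor := by
  intro ciphertext key_byte _
  unfold Spec_bruteforce_single_byte_xor bruteforce_single_byte_xor bruteforce_single_byte_xor_alt
  rw [PySem.List.foldl_append_singleton_eq_map, foldl_filter_sieve]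
  simp only [List.nil_append]
  set Q : Nat → Bool := fun k => ciphertext.toList.all (fun ch => pvGood (ch.toNat ^^^ k)) with hQ
  have hmapscore :
      (PySem.List.pyRange 0 256 1).map (fun i => get_english_score (single_byte_xor ciphertext.toList i))
        = (List.range 256).map (fun i => if Q i then (1:Int) else 0) := by
    rw [PySem.List.pyRange_one]
    rw [show ((256:Int) - 0).toNat = 256 from rfl, List.map_map]
    refine List.map_congr_left (fun k _ => ?_)
    simp only [Function.comp, zero_add]
    exact score_eq_sieve _ k
  rw [hmapscore]
  have h01 : ∀ x ∈ (List.range 256).map (fun i => if Q i then (1:Int) else 0), x = 0 ∨ x = 1 := by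
    intro x hx
    obtain ⟨i, _, hv⟩ := List.mem_map.mp hx
    rw [← hv]; split_ifs <;> simp
  cases hF : (List.range 256).filter Q with
  | nil =>
    have hQfalse : ∀ i ∈ List.range 256, Q i = false := by
      intro i hi
      by_contra h
      have : i ∈ (List.range 256).filter Q := List.mem_filter.mpr ⟨hi, by simpa using h⟩
      simp [hF] at this
    have h1 : (1:Int) ∉ (List.range 256).map (fun i => if Q i then (1:Int) else 0) := by
      intro hmem
      obtain ⟨i, hi, hv⟩ := List.mem_map.mp hmem
      rw [hQfalse i hi] at hv; simp at hv
    rw [max_of_all_zero _ h01 (by simp) h1]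
    have h00 : Q 0 = false := hQfalse 0 (by simp)
    have hr : List.range 256 = 0 :: (List.range 255).map (· + 1) := by
      rw [show (256:Nat) = 255 + 1 from rfl, List.range_succ_eq_map]
    rw [hr]
    simp [PySem.List.index?_eq_idxOf?, List.idxOf?, List.findIdx?_cons, h00]
  | cons k rest =>
    have hk : k ∈ (List.range 256).filter Q := by rw [hF]; exact List.mem_cons_self
    have hkQ : Q k = true := (List.mem_filter.mp hk).2
    have hkr : k ∈ List.range 256 := (List.mem_filter.mp hk).1
    have h1 : (1:Int) ∈ (List.range 256).map (fun i => if Q i then (1:Int) else 0) :=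
      List.mem_map.mpr ⟨k, hkr, by simp [hkQ]⟩
    rw [max_of_mem_one _ h01 h1]
    have hidx := idx_eq_head 256 Q
    rw [hF] at hidx
    simp only [List.head?_cons] at hidx
    simp [PySem.List.index?_eq_idxOf?, hidx]
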